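-- pv_equiv track=rewrite | github.com/fxy1018/Leetcode | 247_Strobogrammatic Number II.py | helpFun
-- ===== SOURCE A (Python) =====
-- def helpFun(n, keys):
--     if n == 0:
--         return([""])
--     res = ['1','8','6','9']
--     for i in range(1, n):
--         tmp = []
--         for r in res:
--             for key in keys:
--                 tmp.append(r+key)
--         res = tmp
--     return(res)
-- ===== SOURCE B (Python) =====
-- def helpFun(n, keys):
--     def build(k):
--         if k <= 0:
--             return ['']
--         return [p + key for p in build(k - 1) for key in keys]
--     if n == 0:
--         return ['']
--     return [s + suf for s in ['1', '8', '6', '9'] for suf in build(n - 1)]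
-- ===== Notes on version B (the rewrite author's own statement) =====
-- stated objective: alternative
-- what changed: Replaces the iterative list-replacement loop (res rebuilt n-1 times via nested append loops) with a recursive helper build(k) that returns all length-k key strings, composed with the four seeds by a comprehension.
import Mathlib
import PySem

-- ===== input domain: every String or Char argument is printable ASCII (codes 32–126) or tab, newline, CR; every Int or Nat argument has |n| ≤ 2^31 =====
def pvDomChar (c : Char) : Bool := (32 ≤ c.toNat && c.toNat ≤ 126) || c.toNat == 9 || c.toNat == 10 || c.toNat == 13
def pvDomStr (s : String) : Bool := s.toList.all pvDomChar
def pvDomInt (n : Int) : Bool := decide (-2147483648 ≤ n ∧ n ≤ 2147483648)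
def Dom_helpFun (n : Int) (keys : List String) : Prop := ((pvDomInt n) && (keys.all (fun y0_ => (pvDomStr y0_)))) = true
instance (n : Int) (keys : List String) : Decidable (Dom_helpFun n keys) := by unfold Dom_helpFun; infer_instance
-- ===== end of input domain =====

-- B replaces A's iterative list-replacement loop by a recursion over the string length
-- (build k = all length-k key strings), composed with the four seeds; alternative decomposition, same cost.

-- ===== PORT A =====
def helpFun (n : Int) (keys : List String) : List String :=
  if n == 0 then [""]
  else
    (PySem.List.pyRange 1 n 1).foldl
      (fun res _ =>
        res.foldl (fun tmp r => keys.foldl (fun tmp key => tmp ++ [r ++ key]) tmp) [])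
      ["1", "8", "6", "9"]

-- ===== PORT B =====
-- build(k): all length-k strings over keys; build(k) = [''] for k ≤ 0 (ported via Int.toNat on the call)
def buildAlt (keys : List String) : Nat → List String
  | 0 => [""]
  | k + 1 => (buildAlt keys k).flatMap (fun p => keys.map (fun key => p ++ key))

def helpFun_alt (n : Int) (keys : List String) : List String :=
  if n == 0 then [""]
  else (["1", "8", "6", "9"]).flatMap
    (fun s => (buildAlt keys (n - 1).toNat).map (fun suf => s ++ suf))

-- ===== PRECONDITION & SPEC =====
def Spec_helpFun (n : Int) (keys : List String) (out : List String) : Prop := out = helpFun_alt n keys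
instance (n : Int) (keys : List String) (out : List String) : Decidable (Spec_helpFun n keys out) := by unfold Spec_helpFun; infer_instance

-- ===== CLAIM (what is proved, stated in full; the proofs are below) =====
def Claim_equal_helpFun : Prop := ∀ (n : Int) (keys : List String), Dom_helpFun n keys → Spec_helpFun n keys (helpFun n keys)

-- ===== LEMMAS AND PROOFS =====

-- A's inner key-loop is an append of the mapped keys
theorem innerLoop_eq (keys : List String) (r : String) (tmp : List String) :
    keys.foldl (fun tmp key => tmp ++ [r ++ key]) tmp = tmp ++ keys.map (fun key => r ++ key) := by
  induction keys generalizing tmp with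
  | nil => simp
  | cons k ks ih => simp [List.foldl, ih]

-- A's one round (rebuild of res) is a flatMap
theorem stepEq (keys res : List String) :
    res.foldl (fun tmp r => keys.foldl (fun tmp key => tmp ++ [r ++ key]) tmp) [] =
      res.flatMap (fun r => keys.map (fun key => r ++ key)) := by
  suffices h : ∀ acc, res.foldl (fun tmp r => keys.foldl (fun tmp key => tmp ++ [r ++ key]) tmp) acc =
      acc ++ res.flatMap (fun r => keys.map (fun key => r ++ key)) by
    simpa using h []
  induction res with
  | nil => simp
  | cons r rs ih =>
    intro acc
    rw [List.foldl_cons, innerLoop_eq, ih, List.flatMap_cons, List.append_assoc]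

-- build can also be unfolded at the front: first key slowest
theorem buildAlt_front (keys : List String) (k : Nat) :
    buildAlt keys (k + 1) = keys.flatMap (fun key => (buildAlt keys k).map (fun p => key ++ p)) := by
  induction k with
  | zero => simp [buildAlt]
  | succ k ih =>
    show (buildAlt keys (k + 1)).flatMap _ = _
    conv_lhs => rw [ih]
    simp only [buildAlt, List.flatMap_assoc, List.flatMap_map, List.map_flatMap, List.map_map,
      Function.comp_def, String.append_assoc]

-- A's loop, run m rounds from any cur, produces cur × (all length-m strings)
theorem loop_eq (keys : List String) (l : List Int) (cur : List String) :
    l.foldl (fun res _ =>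
        res.foldl (fun tmp r => keys.foldl (fun tmp key => tmp ++ [r ++ key]) tmp) []) cur =
      cur.flatMap (fun s => (buildAlt keys l.length).map (fun suf => s ++ suf)) := by
  induction l generalizing cur with
  | nil => simp [buildAlt]
  | cons x xs ih =>
    simp only [List.foldl, List.length_cons]
    rw [ih, stepEq, buildAlt_front]
    simp [List.flatMap_assoc, List.flatMap_map, List.map_flatMap, List.map_map,
      Function.comp_def, String.append_assoc]

-- ===== VERDICT (by name: the statement is the Claim_ definition above) =====
theorem helpFun_spec : Claim_equal_helpFun := by
  intro n keys _
  show helpFun n keys = helpFun_alt n keys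
  unfold helpFun helpFun_alt
  by_cases h : n = 0
  · simp [h]
  · simp only [beq_iff_eq, h, if_false]
    rw [loop_eq, PySem.List.length_pyRange_one]
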